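-- pv_equiv track=rewrite | github.com/Panta-Rhei-Research/site | scripts/latex_to_mathml.py | _tokenize_dollar_math
-- ===== SOURCE A (Python) =====
-- def _tokenize_dollar_math(s: str):
--     """Yield a sequence of ('text', str) and ('math', str) tokens.
--
--     Handles $...$ but not $$...$$ (none in the bibliography).
--     """
--     i = 0
--     buf = []
--     while i < len(s):
--         if s[i] == "$":
--             # Flush text buffer
--             if buf:
--                 yield ("text", "".join(buf))
--                 buf = []
--             # Find closing $
--             j = i + 1
--             while j < len(s) and s[j] != "$":
--                 j += 1
--             if j < len(s):
--                 yield ("math", s[i + 1:j])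
--                 i = j + 1
--             else:
--                 # Unclosed $ — treat as text
--                 buf.append(s[i])
--                 i += 1
--         else:
--             buf.append(s[i])
--             i += 1
--     if buf:
--         yield ("text", "".join(buf))
-- ===== SOURCE B (Python) =====
-- def _tokenize_dollar_math(s: str):
--     """Yield ('text', str) and ('math', str) tokens for $...$ inline math.
--
--     Chunk-based: find the next '$' with str.find / str.partition instead of
--     accumulating a character buffer.
--     """
--     rest = s
--     while rest:
--         k = rest.find("$")
--         if k == -1:
--             yield ("text", rest)
--             return
--         if k > 0:
--             yield ("text", rest[:k])
--         body, sep, after = rest[k + 1:].partition("$")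
--         if not sep:
--             # Unclosed '$' — the rest is plain text
--             yield ("text", rest[k:])
--             return
--         yield ("math", body)
--         rest = after
-- ===== Notes on version B (the rewrite author's own statement) =====
-- stated objective: faster
-- what changed: Replaced the per-character buffer loop with its inner closing-dollar scan by a chunk loop that cuts the string with str.find/str.partition.
import Mathlib
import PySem

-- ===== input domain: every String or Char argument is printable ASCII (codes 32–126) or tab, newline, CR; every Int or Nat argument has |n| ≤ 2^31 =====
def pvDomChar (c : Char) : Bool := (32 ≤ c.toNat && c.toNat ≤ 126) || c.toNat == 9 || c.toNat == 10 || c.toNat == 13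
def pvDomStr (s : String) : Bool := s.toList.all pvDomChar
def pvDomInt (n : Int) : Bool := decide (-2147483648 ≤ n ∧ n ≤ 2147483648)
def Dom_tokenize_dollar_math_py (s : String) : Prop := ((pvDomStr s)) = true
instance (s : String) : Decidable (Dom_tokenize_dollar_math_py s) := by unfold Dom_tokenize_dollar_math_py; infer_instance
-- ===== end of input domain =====

-- B replaces A's per-character buffer loop (with an inner closing-'$' scan) by an idiomatic
-- chunk loop cutting the string with find/partition; same output, same O(n) cost.

-- ===== PORT A =====
-- A's inner loop `j = i+1; while j < len(s) and s[j] != '$': j += 1`: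
-- returns some (s[i+1:j], s[j+1:]) if the closing '$' exists (j < len), none otherwise.
def pvScanClose : List Char → Option (List Char × List Char)
  | [] => none
  | c :: t =>
    if c = '$' then some ([], t)
    else
      match pvScanClose t with
      | none => none
      | some (m, r) => some (c :: m, r)

-- needed by pvTokA's decreasing_by
theorem pvScanClose_length : ∀ (t m r : List Char), pvScanClose t = some (m, r) → r.length < t.length := by
  intro t
  induction t with
  | nil => intro m r h; simp [pvScanClose] at h
  | cons c t ih =>
    intro m r h
    by_cases hc : c = '$'
    · simp [pvScanClose, hc] at h
      obtain ⟨-, hr⟩ := h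
      subst hr; simp
    · simp only [pvScanClose, if_neg hc] at h
      cases hs : pvScanClose t with
      | none => rw [hs] at h; simp at h
      | some p =>
        obtain ⟨m', r'⟩ := p
        rw [hs] at h; simp at h
        obtain ⟨-, hr⟩ := h
        subst hr
        have := ih m' r' hs
        simp; omega

-- A's main `while i < len(s)` loop; buf holds the pending text chars in reverse
def pvTokA : List Char → List Char → List (String × String)
  | [], buf => if buf = [] then [] else [("text", String.mk buf.reverse)]
  | c :: t, buf =>
    if c = '$' then
      (if buf = [] then [] else [("text", String.mk buf.reverse)]) ++
        (match h : pvScanClose t with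
         | some (m, r) => ("math", String.mk m) :: pvTokA r []
         | none => pvTokA t ['$'])
    else
      pvTokA t (c :: buf)
termination_by cs _ => cs.length
decreasing_by
  · exact Nat.lt_succ_of_lt (pvScanClose_length t m r h)
  · simp
  · simp

def tokenize_dollar_math_py (s : String) : List (String × String) :=
  pvTokA s.toList []

-- ===== PORT B =====
-- B's `while rest:` loop: k = rest.find('$'); optional pre-text chunk;
-- body, sep, after = rest[k+1:].partition('$'); recurse on `after`.
def pvTokB (cs : List Char) : List (String × String) :=
  if hn : cs = [] then []
  else
    match cs.findIdx? (· == '$') with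
    | none => [("text", String.mk cs)]
    | some k =>
      (if 0 < k then [("text", String.mk (cs.take k))] else []) ++
        (match (cs.drop (k + 1)).findIdx? (· == '$') with
         | none => [("text", String.mk (cs.drop k))]
         | some j => ("math", String.mk ((cs.drop (k + 1)).take j)) ::
             pvTokB ((cs.drop (k + 1)).drop (j + 1)))
termination_by cs.length
decreasing_by
  have : 0 < cs.length := List.length_pos_iff.mpr hn
  simp
  omega

def tokenize_dollar_math_py_alt (s : String) : List (String × String) :=
  pvTokB s.toList

-- ===== PRECONDITION & SPEC =====
def Spec_tokenize_dollar_math_py (s : String) (out : List (String × String)) : Prop := out = tokenize_dollar_math_py_alt s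
instance (s : String) (out : List (String × String)) : Decidable (Spec_tokenize_dollar_math_py s out) := by unfold Spec_tokenize_dollar_math_py; infer_instance

-- ===== CLAIM (what is proved, stated in full; the proofs are below) =====
def Claim_equal_tokenize_dollar_math_py : Prop := ∀ (s : String), Dom_tokenize_dollar_math_py s → Spec_tokenize_dollar_math_py s (tokenize_dollar_math_py s)

-- ===== LEMMAS AND PROOFS =====

-- A's inner scan is exactly B's find + cut
theorem pvScanClose_eq (t : List Char) :
    pvScanClose t = (t.findIdx? (· == '$')).map (fun k => (t.take k, t.drop (k + 1))) := by
  induction t with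
  | nil => simp [pvScanClose]
  | cons c t ih =>
    by_cases hc : c = '$'
    · subst hc
      simp [pvScanClose, List.findIdx?_cons]
    · rw [List.findIdx?_cons]
      simp only [pvScanClose, if_neg hc, beq_iff_eq, hc, if_false]
      rw [ih]
      cases hf : t.findIdx? (· == '$') with
      | none => simp [hf]
      | some k => simp [hf]

theorem pvTokB_noDollar (cs : List Char) (h : cs.findIdx? (· == '$') = none) :
    pvTokB cs = if cs = [] then [] else [("text", String.mk cs)] := by
  rw [pvTokB]
  by_cases hn : cs = [] <;> simp [hn, h]

theorem pvTokB_dollar (t : List Char) :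
    pvTokB ('$' :: t) =
      match pvScanClose t with
      | none => [("text", String.mk ('$' :: t))]
      | some (m, r) => ("math", String.mk m) :: pvTokB r := by
  rw [pvTokB]
  rw [pvScanClose_eq]
  simp only [List.findIdx?_cons]
  cases hf : t.findIdx? (· == '$') with
  | none => simp [hf]
  | some j => simp [hf]

theorem pvTokB_pre (p t : List Char) (hp : p ≠ []) (hnd : p.findIdx? (· == '$') = none) :
    pvTokB (p ++ '$' :: t) = ("text", String.mk p) :: pvTokB ('$' :: t) := by
  have hidx : (p ++ '$' :: t).findIdx? (· == '$') = some p.length := by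
    rw [List.findIdx?_append, hnd]
    simp [List.findIdx?_cons]
  have htake : (p ++ '$' :: t).take p.length = p := by simp
  have hdrop1 : (p ++ '$' :: t).drop (p.length + 1) = t := by
    have : p.length + 1 = p.length + 1 := rfl
    simp [List.drop_append]
  have hdrop0 : (p ++ '$' :: t).drop p.length = '$' :: t := by simp
  rw [pvTokB]
  rw [dif_neg (by simp)]
  rw [hidx]
  simp only [htake, hdrop1, hdrop0]
  rw [if_pos (List.length_pos_iff.mpr hp)]
  rw [pvTokB_dollar, pvScanClose_eq]
  cases hf : t.findIdx? (· == '$') with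
  | none => simp [hf]
  | some j => simp [hf]

-- one-step unfolding lemmas for pvTokA (its '$' branch hides a dependent match)
theorem pvTokA_nil (buf : List Char) :
    pvTokA [] buf = if buf = [] then [] else [("text", String.mk buf.reverse)] := by
  simp only [pvTokA]

theorem pvTokA_cons (c : Char) (t buf : List Char) (hc : c ≠ '$') :
    pvTokA (c :: t) buf = pvTokA t (c :: buf) := by
  simp only [pvTokA]
  rw [if_neg hc]

theorem pvTokA_dollar_some (t buf m r : List Char) (hs : pvScanClose t = some (m, r)) :
    pvTokA ('$' :: t) buf =
      (if buf = [] then [] else [("text", String.mk buf.reverse)]) ++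
        ("math", String.mk m) :: pvTokA r [] := by
  simp only [pvTokA]
  rw [if_pos trivial]
  congr 1
  split
  · next m' r' h => rw [hs] at h; simp at h; obtain ⟨h1, h2⟩ := h; subst h1; subst h2; rfl
  · next h => rw [hs] at h; exact absurd h (by simp)

theorem pvTokA_dollar_none (t buf : List Char) (hs : pvScanClose t = none) :
    pvTokA ('$' :: t) buf =
      (if buf = [] then [] else [("text", String.mk buf.reverse)]) ++ pvTokA t ['$'] := by
  simp only [pvTokA]
  rw [if_pos trivial]
  congr 1
  split
  · next m' r' h => rw [hs] at h; exact absurd h (by simp)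
  · next h => rfl

theorem pvTokA_noDollar : ∀ (t : List Char), t.findIdx? (· == '$') = none →
    ∀ buf : List Char, pvTokA t buf =
      if buf = [] ∧ t = [] then [] else [("text", String.mk (buf.reverse ++ t))] := by
  intro t
  induction t with
  | nil =>
    intro _ buf
    rw [pvTokA_nil]
    by_cases hb : buf = [] <;> simp [hb]
  | cons c t ih =>
    intro h buf
    rw [List.findIdx?_cons] at h
    by_cases hc : c = '$'
    · simp [hc] at h
    · simp only [beq_iff_eq, hc, if_false] at h
      have h' : t.findIdx? (· == '$') = none := by
        cases hf : t.findIdx? (· == '$') with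
        | none => rfl
        | some k => rw [hf] at h; simp at h
      rw [pvTokA_cons c t buf hc, ih h' (c :: buf)]
      simp

theorem pvRevNone (buf : List Char) (hb : buf.findIdx? (· == '$') = none) :
    buf.reverse.findIdx? (· == '$') = none := by
  rw [List.findIdx?_eq_none_iff] at hb ⊢
  intro x hx
  exact hb x (List.mem_reverse.mp hx)

theorem pvMain : ∀ (n : Nat) (cs : List Char), cs.length ≤ n →
    ∀ buf : List Char, buf.findIdx? (· == '$') = none →
      pvTokA cs buf = pvTokB (buf.reverse ++ cs) := by
  intro n
  induction n with
  | zero =>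
    intro cs hle buf hb
    have hcs : cs = [] := List.eq_nil_of_length_eq_zero (Nat.le_zero.mp hle)
    subst hcs
    rw [pvTokA_nil, List.append_nil, pvTokB_noDollar _ (pvRevNone buf hb)]
    by_cases hbuf : buf = [] <;> simp [hbuf]
  | succ n ih =>
    intro cs hle buf hb
    cases cs with
    | nil =>
      rw [pvTokA_nil, List.append_nil, pvTokB_noDollar _ (pvRevNone buf hb)]
      by_cases hbuf : buf = [] <;> simp [hbuf]
    | cons c t =>
      have hlt : t.length ≤ n := by simp at hle; omega
      by_cases hc : c = '$'
      · subst hc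
        have hrw : pvTokB (buf.reverse ++ '$' :: t) =
            (if buf = [] then [] else [("text", String.mk buf.reverse)]) ++ pvTokB ('$' :: t) := by
          by_cases hbuf : buf = []
          · simp [hbuf]
          · rw [pvTokB_pre _ _ (by simp [hbuf]) (pvRevNone buf hb), if_neg hbuf]
            rfl
        rw [hrw]
        cases hs : pvScanClose t with
        | none =>
          have hnd : t.findIdx? (· == '$') = none := by
            rw [pvScanClose_eq] at hs
            cases hf : t.findIdx? (· == '$') with
            | none => rfl
            | some k => rw [hf] at hs; simp at hs
          rw [pvTokA_dollar_none t buf hs, pvTokA_noDollar t hnd ['$'],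
              pvTokB_dollar, pvScanClose_eq, hnd]
          simp
        | some mr =>
          obtain ⟨m, r⟩ := mr
          have hrlen : r.length ≤ n := by
            have := pvScanClose_length t m r hs
            omega
          have hrec := ih r hrlen [] (by simp)
          simp only [List.reverse_nil, List.nil_append] at hrec
          rw [pvTokA_dollar_some t buf m r hs, pvTokB_dollar, hs, hrec]
      · rw [pvTokA_cons c t buf hc,
            ih t hlt (c :: buf) (by rw [List.findIdx?_cons]; simp [hc, hb])]
        simp

-- ===== VERDICT (by name: the statement is the Claim_ definition above) =====
theorem tokenize_dollar_math_py_spec : Claim_equal_tokenize_dollar_math_py := by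
  intro s _
  unfold Spec_tokenize_dollar_math_py tokenize_dollar_math_py tokenize_dollar_math_py_alt
  have := pvMain s.toList.length s.toList (le_refl _) [] (by simp)
  simpa using this
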